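-- pv_equiv track=rewrite | github.com/Ignitor21/Steiner-alogrithm | steiner.py | i1s_batched
-- ===== SOURCE A (Python) =====
-- def rmst_length(points):
--     n = len(points)
--     if n <= 1:
--         return 0
--
--     INF = float("inf")
--     in_tree = [False] * n
--     best_dist = [INF] * n
--     best_dist[0] = 0
--     total = 0
--
--     for _ in range(n):
--         u = -1
--         ud = INF
--         for v in range(n):
--             if not in_tree[v] and best_dist[v] < ud:
--                 ud = best_dist[v]
--                 u = v
--         if u == -1:
--             break
--         in_tree[u] = True
--         total += ud
--         px, py = points[u]
--         for v in range(n):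
--             if not in_tree[v]:
--                 d = abs(points[v][0] - px) + abs(points[v][1] - py)
--                 if d < best_dist[v]:
--                     best_dist[v] = d
--
--     return total
--
-- def hanan_grid(points):
--     xs = sorted({p[0] for p in points})
--     ys = sorted({p[1] for p in points})
--     existing = set(points)
--     candidates = []
--     for x in xs:
--         for y in ys:
--             if (x, y) not in existing:
--                 candidates.append((x, y))
--     return candidates
--
-- def i1s_batched(terminals):
--     points = list(terminals)
--     current_len = rmst_length(points)
--
--     while True:
--         candidates = hanan_grid(points)
--         if not candidates:
--             break
--
--         gains = []
--         for c in candidates: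
--             new_len = rmst_length(points + [c])
--             g = current_len - new_len
--             if g > 0:
--                 gains.append((g, c))
--
--         if not gains:
--             break
--
--         gains.sort(key=lambda t: -t[0])
--
--         added = []
--         used_x = set()
--         used_y = set()
--         for g, c in gains:
--             if c[0] in used_x and c[1] in used_y:
--                 continue
--             added.append(c)
--             used_x.add(c[0])
--             used_y.add(c[1])
--
--         if not added:
--             break
--
--         new_points = points + added
--         new_len = rmst_length(new_points)
--         if new_len >= current_len:
--             best_c = gains[0][1]
--             points.append(best_c)
--             current_len = rmst_length(points)
--         else:
--             points = new_points
--             current_len = new_len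
--
--     return points
-- ===== SOURCE B (Python) =====
-- def rmst_length(points):
--     if len(points) <= 1:
--         return 0
--     x0, y0 = points[0]
--     qs = points[1:]
--     ds = [abs(x - x0) + abs(y - y0) for (x, y) in qs]
--     total = 0
--     while ds:
--         bi = ds.index(min(ds))
--         px, py = qs.pop(bi)
--         total += ds.pop(bi)
--         for i, (x, y) in enumerate(qs):
--             nd = abs(x - px) + abs(y - py)
--             if nd < ds[i]:
--                 ds[i] = nd
--     return total
--
--
-- def i1s_batched(terminals):
--     points = list(terminals)
--     current_len = rmst_length(points)
--
--     while True:
--         xs = sorted({p[0] for p in points})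
--         ys = sorted({p[1] for p in points})
--         gains = sorted(
--             ((g, c)
--              for c in ((x, y) for x in xs for y in ys if (x, y) not in points)
--              for g in (current_len - rmst_length(points + [c]),)
--              if g > 0),
--             key=lambda t: -t[0])
--         if not gains:
--             return points
--
--         added, used_x, used_y = [], set(), set()
--         for g, c in gains:
--             if not (c[0] in used_x and c[1] in used_y):
--                 added.append(c)
--                 used_x.add(c[0])
--                 used_y.add(c[1])
--
--         new_points = points + added
--         new_len = rmst_length(new_points)
--         if new_len >= current_len:
--             points = points + [gains[0][1]]
--             current_len = rmst_length(points)
--         else: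
--             points, current_len = new_points, new_len
-- ===== Notes on version B (the rewrite author's own statement) =====
-- stated objective: alternative
-- what changed: The rectilinear-MST length is recomputed by Prim over a shrinking frontier of off-tree (point, distance) pairs (min + first-index + pop per round) instead of full-length in-tree-flag and best-dist arrays rescanned over all n vertices each round, and the outer pass fuses Hanan-grid generation with gain filtering into one comprehension, dropping A's redundant empty-candidates and empty-added checks.
import Mathlib
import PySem

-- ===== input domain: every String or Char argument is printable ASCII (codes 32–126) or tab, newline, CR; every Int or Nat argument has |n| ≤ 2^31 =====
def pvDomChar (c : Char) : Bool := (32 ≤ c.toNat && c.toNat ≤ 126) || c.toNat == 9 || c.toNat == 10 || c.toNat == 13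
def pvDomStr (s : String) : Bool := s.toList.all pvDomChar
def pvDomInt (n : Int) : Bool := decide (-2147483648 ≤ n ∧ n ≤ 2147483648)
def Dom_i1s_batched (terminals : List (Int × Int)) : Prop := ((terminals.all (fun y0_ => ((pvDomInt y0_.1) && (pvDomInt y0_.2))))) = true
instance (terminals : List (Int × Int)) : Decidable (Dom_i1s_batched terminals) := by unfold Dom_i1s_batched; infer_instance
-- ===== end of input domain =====

-- B re-implements the per-iteration rectilinear-MST recomputation over a shrinking frontier of
-- off-tree vertices (paired point/distance lists, min+first-index+pop) instead of A's full-length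
-- flag/distance arrays rescanned over all n vertices each round, and fuses Hanan-grid generation
-- with gain filtering; same results, fewer scanned entries per Prim round.

-- ===== PORT A =====

-- float('inf') appears in A only as a sentinel distance: ported as `none` (none = INF).
-- pvOLt is Python's '<' on these values: finite < INF, never INF < x.
def pvOLt : Option Int → Option Int → Bool
  | none, _ => false
  | some _, none => true
  | some a, some b => a < b

-- the `u = -1 / for v in range(n): if not in_tree[v] and best_dist[v] < ud` selection scan
def pvSelA (inT : List Bool) (bd : List (Option Int)) (n : Nat) : Int × Option Int :=
  (List.range n).foldl
    (fun uud v =>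
      if !(inT.getD v true) && pvOLt (bd.getD v none) uud.2 then ((v : Int), bd.getD v none)
      else uud)
    (-1, none)

-- the relaxation scan `for v in range(n): if not in_tree[v]: …`
def pvRelaxA (points : List (Int × Int)) (inT : List Bool) (bd : List (Option Int))
    (px py : Int) (n : Nat) : List (Option Int) :=
  (List.range n).map (fun v =>
    if !(inT.getD v true) then
      (if pvOLt (some (|(points.getD v (0,0)).1 - px| + |(points.getD v (0,0)).2 - py|))
            (bd.getD v none)
       then some (|(points.getD v (0,0)).1 - px| + |(points.getD v (0,0)).2 - py|)
       else bd.getD v none)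
    else bd.getD v none)

-- `for _ in range(n)` of A's Prim loop; fuel = the remaining number of rounds
def pvPrimA (points : List (Int × Int)) : Nat → List Bool → List (Option Int) → Int → Int
  | 0, _, _, total => total
  | fuel+1, inT, bd, total =>
    let uud := pvSelA inT bd points.length
    if uud.1 == -1 then total
    else
      let u := uud.1.toNat
      let inT' := inT.set u true
      let total' := total + uud.2.getD 0   -- ud is finite (some _) whenever u ≠ -1
      let p := points.getD u (0, 0)
      pvPrimA points fuel inT' (pvRelaxA points inT' bd p.1 p.2 points.length) total'

def pvRmstA (points : List (Int × Int)) : Int :=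
  if points.length ≤ 1 then 0
  else pvPrimA points points.length (List.replicate points.length false)
        ((List.replicate points.length (none : Option Int)).set 0 (some 0)) 0

def pvHananA (points : List (Int × Int)) : List (Int × Int) :=
  let xs := PySem.List.sorted (PySem.Set.ofList (points.map (·.1))) (fun x => x) false
  let ys := PySem.List.sorted (PySem.Set.ofList (points.map (·.2))) (fun y => y) false
  xs.foldl (fun acc x =>
    ys.foldl (fun acc y => if points.contains (x, y) then acc else acc ++ [(x, y)]) acc) []

def pvGainsA (points : List (Int × Int)) (cur : Int) (cands : List (Int × Int)) :
    List (Int × (Int × Int)) :=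
  cands.foldl (fun gs c =>
    let g := cur - pvRmstA (points ++ [c])
    if 0 < g then gs ++ [(g, c)] else gs) []

def pvAddA (gains : List (Int × (Int × Int))) : List (Int × Int) :=
  (gains.foldl
    (fun (st : List (Int × Int) × PySem.Set Int × PySem.Set Int) gc =>
      if PySem.Set.contains st.2.1 gc.2.1 && PySem.Set.contains st.2.2 gc.2.2 then st
      else (st.1 ++ [gc.2], PySem.Set.add st.2.1 gc.2.1, PySem.Set.add st.2.2 gc.2.2))
    ([], PySem.Set.empty, PySem.Set.empty)).1

-- `while True:` of A; the fuel is a totality guard only (each pass adds at least one new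
-- Hanan-grid point and there are at most n^2 of them, so n^2+2 passes are never exhausted)
def pvLoopA : Nat → List (Int × Int) → Int → List (Int × Int)
  | 0, points, _ => points
  | fuel+1, points, cur =>
    let cands := pvHananA points
    if cands.isEmpty then points
    else
      let gains := pvGainsA points cur cands
      if gains.isEmpty then points
      else
        let sg := PySem.List.sorted gains (fun t => -t.1) false
        let added := pvAddA sg
        if added.isEmpty then points
        else
          let np := points ++ added
          let nl := pvRmstA np
          if cur ≤ nl then
            let p' := points ++ [(sg.headD (0, (0, 0))).2]
            pvLoopA fuel p' (pvRmstA p')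
          else pvLoopA fuel np nl

def i1s_batched (terminals : List (Int × Int)) : List (Int × Int) :=
  pvLoopA (terminals.length * terminals.length + 2) terminals (pvRmstA terminals)

-- ===== PORT B =====

-- B's Prim loop over the shrinking frontier `qs`/`ds`; fuel = ds.length at every call
def pvPrimB : Nat → List (Int × Int) → List Int → Int → Int
  | 0, _, _, total => total
  | fuel+1, qs, ds, total =>
    if ds.isEmpty then total
    else
      match PySem.List.min? ds (fun d => d) with
      | none => total        -- unreachable: ds ≠ []
      | some m =>
        match PySem.List.index? ds m with
        | none => total      -- unreachable: m ∈ ds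
        | some bi =>
          let p := qs.getD bi (0, 0)                  -- qs.pop(bi)
          let total' := total + ds.getD bi 0          -- total += ds.pop(bi)
          let qs' := qs.eraseIdx bi
          let ds' := ds.eraseIdx bi
          let ds'' := (qs'.zip ds').map (fun qd =>    -- the `if nd < ds[i]` relaxation
            if |qd.1.1 - p.1| + |qd.1.2 - p.2| < qd.2
            then |qd.1.1 - p.1| + |qd.1.2 - p.2| else qd.2)
          pvPrimB fuel qs' ds'' total'

def pvRmstB (points : List (Int × Int)) : Int :=
  if points.length ≤ 1 then 0
  else
    let p0 := points.getD 0 (0, 0)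
    let qs := points.drop 1                           -- points[1:]
    let ds := qs.map (fun q => |q.1 - p0.1| + |q.2 - p0.2|)
    pvPrimB ds.length qs ds 0

-- the fused `sorted((g, c) for c in hanan-grid if g > 0, key=-g)` comprehension
def pvGainsB (points : List (Int × Int)) (cur : Int) : List (Int × (Int × Int)) :=
  let xs := PySem.List.sorted (PySem.Set.ofList (points.map (·.1))) (fun x => x) false
  let ys := PySem.List.sorted (PySem.Set.ofList (points.map (·.2))) (fun y => y) false
  PySem.List.sorted
    (xs.flatMap (fun x => ys.filterMap (fun y =>
      if points.contains (x, y) then none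
      else
        let g := cur - pvRmstB (points ++ [(x, y)])
        if 0 < g then some (g, (x, y)) else none)))
    (fun t => -t.1) false

def pvAddB (gains : List (Int × (Int × Int))) : List (Int × Int) :=
  (gains.foldl
    (fun (st : List (Int × Int) × PySem.Set Int × PySem.Set Int) gc =>
      if !(PySem.Set.contains st.2.1 gc.2.1 && PySem.Set.contains st.2.2 gc.2.2) then
        (st.1 ++ [gc.2], PySem.Set.add st.2.1 gc.2.1, PySem.Set.add st.2.2 gc.2.2)
      else st)
    ([], PySem.Set.empty, PySem.Set.empty)).1

-- `while True:` of B (no empty-candidates / empty-added re-checks); same totality fuel as A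
def pvLoopB : Nat → List (Int × Int) → Int → List (Int × Int)
  | 0, points, _ => points
  | fuel+1, points, cur =>
    match pvGainsB points cur with
    | [] => points
    | g0 :: rest =>
      let added := pvAddB (g0 :: rest)
      let np := points ++ added
      let nl := pvRmstB np
      if cur ≤ nl then
        let p' := points ++ [g0.2]
        pvLoopB fuel p' (pvRmstB p')
      else pvLoopB fuel np nl

def i1s_batched_alt (terminals : List (Int × Int)) : List (Int × Int) :=
  pvLoopB (terminals.length * terminals.length + 2) terminals (pvRmstB terminals)

-- ===== PRECONDITION & SPEC =====
def Spec_i1s_batched (terminals : List (Int × Int)) (out : List (Int × Int)) : Prop := out = i1s_batched_alt terminals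
instance (terminals : List (Int × Int)) (out : List (Int × Int)) : Decidable (Spec_i1s_batched terminals out) := by unfold Spec_i1s_batched; infer_instance

-- ===== CLAIM (what is proved, stated in full; the proofs are below) =====
def Claim_equal_i1s_batched : Prop := ∀ (terminals : List (Int × Int)), Dom_i1s_batched terminals → Spec_i1s_batched terminals (i1s_batched terminals)

-- ===== LEMMAS AND PROOFS =====

def pvSelG (uud : Int × Option Int) (ve : Nat × Int) : Int × Option Int :=
  if pvOLt (some ve.2) uud.2 then ((ve.1 : Int), some ve.2) else uud

def pvAlive (n : Nat) (inT : List Bool) : List Nat :=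
  (List.range n).filter (fun v => !(inT.getD v true))

theorem pv_if_and {α : Type} (a b : Bool) (x y : α) :
    (if a && b then x else y) = if a then (if b then x else y) else y := by
  cases a <;> cases b <;> simp

-- (1) A's selection scan only looks at off-tree indices
theorem pv_selA_alive (inT : List Bool) (bd : List (Option Int)) (n : Nat) :
    pvSelA inT bd n
      = (pvAlive n inT).foldl
          (fun uud v => if pvOLt (bd.getD v none) uud.2 then ((v : Int), bd.getD v none) else uud)
          (-1, none) := by
  unfold pvSelA pvAlive
  rw [PySem.List.foldl_congr_mem _ _
        (fun uud v => if !(inT.getD v true) then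
          (if pvOLt (bd.getD v none) uud.2 then ((v : Int), bd.getD v none) else uud) else uud) _
        (fun acc v _ => pv_if_and _ _ _ _),
      PySem.List.foldl_if_eq_foldl_filter]

-- (2) the scan over off-tree indices is the scan over the (point, dist) frontier pairs
theorem pv_selA_zip (bd : List (Option Int)) (vs : List Nat) (es : List Int)
    (h : vs.map (fun v => bd.getD v none) = es.map some) (acc : Int × Option Int) :
    vs.foldl (fun uud v => if pvOLt (bd.getD v none) uud.2 then ((v : Int), bd.getD v none) else uud) acc
      = (vs.zip es).foldl pvSelG acc := by
  induction vs generalizing es acc with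
  | nil => simp
  | cons v tv ih =>
    cases es with
    | nil => simp at h
    | cons e te =>
      simp only [List.map_cons, List.cons.injEq] at h
      simp only [List.zip_cons_cons, List.foldl_cons, h.1]
      exact ih te h.2 _

-- (3) a scan whose accumulator is already minimal keeps it
theorem pv_sel_keep (L : List (Nat × Int)) (u : Int) (d : Int) (h : ∀ x ∈ L, d ≤ x.2) :
    L.foldl pvSelG (u, some d) = (u, some d) := by
  induction L with
  | nil => rfl
  | cons x t ih =>
    have hx : d ≤ x.2 := h x (by simp)
    rw [List.foldl_cons, show pvSelG (u, some d) x = (u, some d) from by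
      simp [pvSelG, pvOLt, not_lt.mpr hx]]
    exact ih (fun y hy => h y (by simp [hy]))

-- (4) the scan finds the first strict improvement = first minimum below the accumulator
theorem pv_sel_go (L : List (Nat × Int)) (u : Int) (d : Int) (bi : Nat) (h : bi < L.length)
    (hd : (L[bi]).2 < d) (hmin : ∀ y ∈ L, (L[bi]).2 ≤ y.2)
    (hfirst : ∀ j (hj : j < bi), (L[bi]).2 < (L[j]'(lt_trans hj h)).2) :
    L.foldl pvSelG (u, some d) = (((L[bi]).1 : Int), some (L[bi]).2) := by
  induction L generalizing u d bi with
  | nil => simp at h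
  | cons x t ih =>
    cases bi with
    | zero =>
      simp only [List.getElem_cons_zero] at hd hmin ⊢
      rw [List.foldl_cons, show pvSelG (u, some d) x = ((x.1 : Int), some x.2) from by
        simp [pvSelG, pvOLt, hd]]
      exact pv_sel_keep t _ _ (fun y hy => hmin y (by simp [hy]))
    | succ k =>
      have hk : k < t.length := by simpa using h
      simp only [List.getElem_cons_succ] at hd hmin hfirst ⊢
      have hx : (t[k]).2 < x.2 := by simpa using hfirst 0 (Nat.succ_pos k)
      rw [List.foldl_cons]
      by_cases hxd : x.2 < d
      · rw [show pvSelG (u, some d) x = ((x.1 : Int), some x.2) from by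
          simp [pvSelG, pvOLt, hxd]]
        exact ih _ _ k hk hx (fun y hy => hmin y (by simp [hy]))
          (fun j hj => by simpa using hfirst (j+1) (by omega))
      · rw [show pvSelG (u, some d) x = (u, some d) from by
          simp [pvSelG, pvOLt, hxd]]
        exact ih _ _ k hk hd (fun y hy => hmin y (by simp [hy]))
          (fun j hj => by simpa using hfirst (j+1) (by omega))

-- (5) full characterisation of the selection scan from the (-1, INF) start
theorem pv_sel_fold_min (L : List (Nat × Int)) (bi : Nat) (h : bi < L.length)
    (hmin : ∀ y ∈ L, (L[bi]).2 ≤ y.2)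
    (hfirst : ∀ j (hj : j < bi), (L[bi]).2 < (L[j]'(lt_trans hj h)).2) :
    L.foldl pvSelG (-1, none) = (((L[bi]).1 : Int), some (L[bi]).2) := by
  cases L with
  | nil => simp at h
  | cons x t =>
    rw [List.foldl_cons, show pvSelG (-1, none) x = ((x.1 : Int), some x.2) from by
      simp [pvSelG, pvOLt]]
    cases bi with
    | zero =>
      simp only [List.getElem_cons_zero] at hmin ⊢
      exact pv_sel_keep t _ _ (fun y hy => hmin y (by simp [hy]))
    | succ k =>
      have hk : k < t.length := by simpa using h
      simp only [List.getElem_cons_succ] at hmin hfirst ⊢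
      exact pv_sel_go t _ _ k hk (by simpa using hfirst 0 (Nat.succ_pos k))
        (fun y hy => hmin y (by simp [hy]))
        (fun j hj => by simpa using hfirst (j+1) (by omega))

theorem pv_alive_nodup (n : Nat) (inT : List Bool) : (pvAlive n inT).Nodup :=
  (List.nodup_range).filter _

theorem pv_alive_lt (n : Nat) (inT : List Bool) : ∀ v ∈ pvAlive n inT, v < n := by
  intro v hv
  have := List.mem_of_mem_filter hv
  simpa [List.mem_range] using this

theorem pv_alive_off (n : Nat) (inT : List Bool) :
    ∀ v ∈ pvAlive n inT, inT.getD v true = false := by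
  intro v hv
  have := List.of_mem_filter hv
  simpa using this

-- marking u in-tree removes exactly u from the off-tree index list
theorem pv_alive_set (n : Nat) (inT : List Bool) (u : Nat) :
    pvAlive n (inT.set u true) = (pvAlive n inT).filter (fun v => !(v == u)) := by
  unfold pvAlive
  rw [List.filter_filter]
  apply List.filter_congr
  intro v _
  by_cases hv : v = u
  · subst hv
    by_cases hl : v < inT.length
    · simp [List.getD, List.getElem?_set_self (by omega)]
    · rw [List.set_eq_of_length_le (by omega)]
      simp [List.getD, List.getElem?_eq_none (by omega : inT.length ≤ v)]
  · simp [List.getD, List.getElem?_set_ne (by omega : u ≠ v), hv]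

theorem pv_filter_ne_eraseIdx (xs : List Nat) (hnd : xs.Nodup) (bi : Nat) (h : bi < xs.length) :
    xs.filter (fun v => !(v == xs[bi])) = xs.eraseIdx bi := by
  induction xs generalizing bi with
  | nil => simp at h
  | cons x t ih =>
    cases bi with
    | zero =>
      simp only [List.getElem_cons_zero, List.eraseIdx_cons_zero, List.filter_cons]
      rw [if_neg (by simp)]
      apply List.filter_eq_self.mpr
      intro v hv
      have : v ≠ x := fun he => (List.nodup_cons.mp hnd).1 (he ▸ hv)
      simp [this]
    | succ k =>
      have hk : k < t.length := by simpa using h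
      simp only [List.getElem_cons_succ, List.eraseIdx_cons_succ, List.filter_cons]
      have hxk : x ≠ t[k] := by
        intro he
        exact (List.nodup_cons.mp hnd).1 (he ▸ t.getElem_mem hk)
      rw [if_pos (by simp [hxk])]
      rw [ih (List.nodup_cons.mp hnd).2 k hk]

-- the per-round correspondence: A's flag/distance arrays vs B's shrinking frontier
theorem pv_primAB_inv (points : List (Int × Int)) (k : Nat) :
    ∀ (inT : List Bool) (bd : List (Option Int)) (qs : List (Int × Int)) (ds : List Int) (total : Int),
    qs = (pvAlive points.length inT).map (fun v => points.getD v (0,0)) →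
    (pvAlive points.length inT).map (fun v => bd.getD v none) = ds.map some →
    ds.length = k →
    pvPrimA points k inT bd total = pvPrimB k qs ds total := by
  induction k with
  | zero => intro inT bd qs ds total _ _ _; rfl
  | succ k ih =>
    intro inT bd qs ds total h1 h2 hlen
    subst h1
    have hlal : (pvAlive points.length inT).length = ds.length := by
      simpa using congrArg List.length h2
    have h2j : ∀ j (hj1 : j < (pvAlive points.length inT).length) (hj2 : j < ds.length),
        bd.getD ((pvAlive points.length inT)[j]) none = some (ds[j]) := by
      intro j hj1 hj2
      have h := congrArg (fun l => l[j]?) h2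
      simpa [List.getElem?_map, List.getElem?_eq_getElem, hj1, hj2] using h
    have hdsne : ds ≠ [] := by intro h; rw [h] at hlen; simp at hlen
    obtain ⟨m, hm⟩ : ∃ m, PySem.List.min? ds (fun d => d) = some m := by
      cases hmm : PySem.List.min? ds (fun d => d) with
      | none => exact absurd ((PySem.List.min?_eq_none_iff ds _).mp hmm) hdsne
      | some m => exact ⟨m, rfl⟩
    have hmmin : ∀ y ∈ ds, m ≤ y := fun y hy => PySem.List.min?_isMin hm y hy
    obtain ⟨bi, hbi⟩ : ∃ bi, PySem.List.index? ds m = some bi := by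
      cases hii : PySem.List.index? ds m with
      | none =>
        exact absurd (PySem.List.min?_mem hm) ((PySem.List.index?_eq_none_iff ds m).mp hii)
      | some bi => exact ⟨bi, rfl⟩
    obtain ⟨hbilt, hbieq, hbifirst⟩ := PySem.List.getElem_of_index?_eq_some hbi
    have hbial : bi < (pvAlive points.length inT).length := by omega
    have hzl : bi < ((pvAlive points.length inT).zip ds).length := by
      simp [List.length_zip]; omega
    have hzbi : ((pvAlive points.length inT).zip ds)[bi]
        = ((pvAlive points.length inT)[bi], ds[bi]) := List.getElem_zip
    -- the selection scans agree: first index attaining the minimum distance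
    have hsel : pvSelA inT bd points.length
        = (((pvAlive points.length inT)[bi] : Int), some (ds[bi])) := by
      rw [pv_selA_alive, pv_selA_zip bd _ ds h2,
        pv_sel_fold_min _ bi hzl
          (by
            intro y hy
            rw [hzbi]
            have : y.2 ∈ ds := (List.of_mem_zip hy).2
            simpa [hbieq] using hmmin y.2 this)
          (by
            intro j hj
            have hjz : j < ((pvAlive points.length inT).zip ds).length := lt_trans hj hzl
            rw [hzbi, List.getElem_zip]
            have hne : ds[j]'(by omega) ≠ m := hbifirst j hj
            have hle : m ≤ ds[j]'(by omega) := hmmin _ (List.getElem_mem _)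
            simp only [hbieq]
            omega),
        hzbi]
    -- unfold one round on each side
    rw [show pvPrimA points (k+1) inT bd total
        = pvPrimA points k (inT.set ((pvAlive points.length inT)[bi]) true)
            (pvRelaxA points (inT.set ((pvAlive points.length inT)[bi]) true) bd
              (points.getD ((pvAlive points.length inT)[bi]) (0,0)).1
              (points.getD ((pvAlive points.length inT)[bi]) (0,0)).2 points.length)
            (total + ds[bi]) from by
      simp only [pvPrimA, hsel]
      rw [if_neg (by simp)]
      simp]
    rw [show pvPrimB (k+1) ((pvAlive points.length inT).map (fun v => points.getD v (0,0))) ds total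
        = pvPrimB k (((pvAlive points.length inT).map (fun v => points.getD v (0,0))).eraseIdx bi)
            ((((((pvAlive points.length inT).map (fun v => points.getD v (0,0))).eraseIdx bi)).zip (ds.eraseIdx bi)).map (fun qd =>
              if |qd.1.1 - (((pvAlive points.length inT).map (fun v => points.getD v (0,0))).getD bi (0,0)).1| + |qd.1.2 - (((pvAlive points.length inT).map (fun v => points.getD v (0,0))).getD bi (0,0)).2| < qd.2
              then |qd.1.1 - (((pvAlive points.length inT).map (fun v => points.getD v (0,0))).getD bi (0,0)).1| + |qd.1.2 - (((pvAlive points.length inT).map (fun v => points.getD v (0,0))).getD bi (0,0)).2| else qd.2))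
            (total + ds.getD bi 0) from by
      have hie : ds.isEmpty = false := by simpa [List.isEmpty_iff] using hdsne
      simp only [pvPrimB, hie, hm, hbi, Bool.false_eq_true, if_false]]
    have hqsbi : ((pvAlive points.length inT).map (fun v => points.getD v (0,0))).getD bi (0,0)
        = points.getD ((pvAlive points.length inT)[bi]) (0,0) := by
      rw [List.getD, List.getElem?_map, List.getElem?_eq_getElem hbial]
      rfl
    have hdsbi : ds.getD bi 0 = ds[bi] := List.getD_eq_getElem ds 0 hbilt
    simp only [hqsbi, hdsbi]
    -- re-establish the invariant for the shrunk state
    have halive' : pvAlive points.length (inT.set ((pvAlive points.length inT)[bi]) true)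
        = (pvAlive points.length inT).eraseIdx bi := by
      rw [pv_alive_set, pv_filter_ne_eraseIdx _ (pv_alive_nodup _ _) bi hbial]
    have hbd' : ∀ (px py : Int) (v : Nat), v < points.length →
        (inT.set ((pvAlive points.length inT)[bi]'hbial) true).getD v true = false →
        (pvRelaxA points (inT.set ((pvAlive points.length inT)[bi]'hbial) true) bd px py points.length).getD v none
          = if pvOLt (some (|(points.getD v (0,0)).1 - px| + |(points.getD v (0,0)).2 - py|)) (bd.getD v none)
            then some (|(points.getD v (0,0)).1 - px| + |(points.getD v (0,0)).2 - py|)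
            else bd.getD v none := by
      intro px py v hv hoff
      unfold pvRelaxA
      rw [PySem.List.getD_map_range _ _ _ _ hv, hoff]
      simp
    apply ih
    · rw [halive', List.eraseIdx_map]
    · -- relaxed distances stay in lock-step
      rw [halive']
      apply List.ext_getElem
      · simp [List.length_eraseIdx_of_lt, hbial, hbilt, List.length_zip]
        omega
      · intro j hj1 hj2
        simp only [List.length_map] at hj1 hj2
        simp only [List.getElem_map]
        have hv : ((pvAlive points.length inT).eraseIdx bi)[j]'hj1
            ∈ pvAlive points.length (inT.set ((pvAlive points.length inT)[bi]'hbial) true) := by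
          rw [halive']
          exact List.getElem_mem _
        have hvlt := pv_alive_lt _ _ _ hv
        have hvoff := pv_alive_off _ _ _ hv
        rw [hbd' _ _ _ hvlt hvoff]
        have hjz : j < ((((pvAlive points.length inT).map (fun v => points.getD v (0,0))).eraseIdx bi).zip (ds.eraseIdx bi)).length := hj2
        have hjq : j < (((pvAlive points.length inT).map (fun v => points.getD v (0,0))).eraseIdx bi).length := by
          simp only [List.length_zip] at hjz; omega
        have hjd : j < (ds.eraseIdx bi).length := by
          simp only [List.length_zip] at hjz; omega
        rw [List.getElem_zip (h := hjz)]
        have hqj : ((((pvAlive points.length inT).map (fun v => points.getD v (0,0))).eraseIdx bi))[j]'hjq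
            = points.getD (((pvAlive points.length inT).eraseIdx bi)[j]'hj1) (0,0) := by
          simp only [List.eraseIdx_map, List.getElem_map]
        have hdj : bd.getD (((pvAlive points.length inT).eraseIdx bi)[j]'hj1) none
            = some ((ds.eraseIdx bi)[j]'hjd) := by
          rw [List.getElem_eraseIdx hj1, List.getElem_eraseIdx hjd]
          by_cases hjb : j < bi
          · rw [dif_pos hjb, dif_pos hjb]
            exact h2j j (by omega) (by omega)
          · rw [dif_neg hjb, dif_neg hjb]
            have hj1' : j + 1 < (pvAlive points.length inT).length := by
              rw [List.length_eraseIdx_of_lt hbial] at hj1; omega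
            exact h2j (j+1) hj1' (by omega)
        rw [hqj, hdj]
        by_cases hlt : |(points.getD (((pvAlive points.length inT).eraseIdx bi)[j]'hj1) (0,0)).1
              - (points.getD ((pvAlive points.length inT)[bi]'hbial) (0,0)).1|
            + |(points.getD (((pvAlive points.length inT).eraseIdx bi)[j]'hj1) (0,0)).2
              - (points.getD ((pvAlive points.length inT)[bi]'hbial) (0,0)).2|
            < (ds.eraseIdx bi)[j]'hjd
        · rw [if_pos (by simpa [pvOLt] using hlt), if_pos hlt]
        · rw [if_neg (by simpa [pvOLt] using hlt), if_neg hlt]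
    · simp only [List.length_map, List.length_zip, List.eraseIdx_map,
        List.length_eraseIdx_of_lt hbilt, List.length_eraseIdx_of_lt hbial]
      omega

-- round one of A from the [INF,…,INF] start always selects vertex 0 at distance 0
theorem pv_sel_first (n : Nat) (hn : 1 ≤ n) :
    pvSelA (List.replicate n false) ((List.replicate n (none : Option Int)).set 0 (some 0)) n
      = (0, some 0) := by
  unfold pvSelA
  obtain ⟨m, rfl⟩ : ∃ m, n = m + 1 := ⟨n - 1, by omega⟩
  rw [List.range_succ_eq_map, List.foldl_cons]
  have h0t : (List.replicate (m+1) false).getD 0 true = false := by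
    simp [List.getD]
  have h0d : ((List.replicate (m+1) (none : Option Int)).set 0 (some 0)).getD 0 none
      = some 0 := by
    simp [List.getD]
  rw [h0t, h0d]
  simp only [Bool.not_false, Bool.true_and, pvOLt, if_true]
  rw [PySem.List.foldl_congr_mem _ _ (fun acc _ => acc) _ (fun acc x hx => by
    obtain ⟨i, hi, rfl⟩ := List.mem_map.mp hx
    have : ((List.replicate (m+1) (none : Option Int)).set 0 (some 0)).getD i.succ none = none := by
      have him : i < m := List.mem_range.mp hi
      simp [List.getD, Nat.succ_lt_succ him]
    rw [this]
    simp), PySem.List.foldl_ignore]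
  simp

theorem pv_rmstAB (points : List (Int × Int)) : pvRmstA points = pvRmstB points := by
  unfold pvRmstA pvRmstB
  by_cases h : points.length ≤ 1
  · rw [if_pos h, if_pos h]
  · rw [if_neg h, if_neg h]
    have hn : 2 ≤ points.length := by omega
    have hfuel : points.length = (points.length - 1) + 1 := by omega
    rw [show pvPrimA points points.length (List.replicate points.length false)
          ((List.replicate points.length (none : Option Int)).set 0 (some 0)) 0
        = pvPrimA points ((points.length - 1) + 1) (List.replicate points.length false)
          ((List.replicate points.length (none : Option Int)).set 0 (some 0)) 0 from by
      rw [← hfuel]]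
    simp only [pvPrimA]
    rw [pv_sel_first points.length (by omega)]
    rw [if_neg (by decide)]
    simp only [Int.toNat_zero, Option.getD_some, add_zero]
    have hds0 : ((points.drop 1).map
        (fun q => |q.1 - (points.getD 0 (0,0)).1| + |q.2 - (points.getD 0 (0,0)).2|)).length
        = points.length - 1 := by simp
    rw [hds0]
    -- the state after round one satisfies the frontier invariant
    have halive1 : pvAlive points.length ((List.replicate points.length false).set 0 true)
        = (List.range (points.length - 1)).map Nat.succ := by
      unfold pvAlive
      rw [hfuel, List.range_succ_eq_map, List.filter_cons]
      rw [if_neg (by simp [List.getD])]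
      apply List.filter_eq_self.mpr
      intro v hv
      obtain ⟨i, hi, rfl⟩ := List.mem_map.mp hv
      have him : i < points.length - 1 := List.mem_range.mp hi
      simp [List.getD, him]
    apply pv_primAB_inv
    · rw [halive1]
      apply List.ext_getElem
      · simp
      · intro j hj1 hj2
        simp only [List.length_drop] at hj1
        rw [List.getElem_drop, List.getElem_map, List.getElem_map, List.getElem_range]
        rw [List.getD_eq_getElem points (0,0) (by omega : j.succ < points.length)]
        congr 1
        omega
    · rw [halive1]
      apply List.ext_getElem
      · simp
      · intro j hj1 hj2
        simp only [List.length_map, List.length_range, List.length_drop] at hj1 hj2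
        simp only [List.getElem_map, List.getElem_range]
        have hjn : j.succ < points.length := by omega
        unfold pvRelaxA
        rw [PySem.List.getD_map_range _ _ _ _ hjn]
        have hoff : ((List.replicate points.length false).set 0 true).getD j.succ true = false := by
          simp [List.getD, hjn]
        rw [hoff]
        have hbd0 : ((List.replicate points.length (none : Option Int)).set 0 (some 0)).getD j.succ none
            = none := by
          simp [List.getD, hjn]
        rw [hbd0]
        simp only [Bool.not_false, if_true, pvOLt]
        rw [List.getElem_drop, List.getD_eq_getElem points (0,0) hjn]
        have hidx : 1 + j = j.succ := by omega
        simp_rw [hidx]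
    · simp

-- A's gains loop over any candidate list is a filterMap (B's fused comprehension body)
theorem pv_gains_fold (points : List (Int × Int)) (cur : Int) (cands : List (Int × Int))
    (gs0 : List (Int × (Int × Int))) :
    cands.foldl (fun gs c =>
        if 0 < cur - pvRmstB (points ++ [c]) then gs ++ [(cur - pvRmstB (points ++ [c]), c)] else gs) gs0
      = gs0 ++ cands.filterMap (fun c =>
          if 0 < cur - pvRmstB (points ++ [c]) then some (cur - pvRmstB (points ++ [c]), c) else none) := by
  induction cands generalizing gs0 with
  | nil => simp
  | cons c t ih =>
    simp only [List.foldl_cons, List.filterMap_cons]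
    split_ifs with h
    · rw [ih]; simp
    · rw [ih]

theorem pv_hanan_inner (points : List (Int × Int)) (x : Int) (ys : List Int)
    (acc : List (Int × Int)) :
    ys.foldl (fun acc y => if points.contains (x, y) then acc else acc ++ [(x, y)]) acc
      = acc ++ ys.filterMap (fun y => if points.contains (x, y) then none else some (x, y)) := by
  induction ys generalizing acc with
  | nil => simp
  | cons y ty ih =>
    simp only [List.foldl_cons, List.filterMap_cons]
    cases hy : points.contains (x, y) with
    | true => simpa using ih acc
    | false => rw [if_neg (by simp), if_neg (by simp), ih]; simp
    
theorem pv_hanan_flat (points : List (Int × Int)) :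
    pvHananA points
      = (PySem.List.sorted (PySem.Set.ofList (points.map (·.1))) (fun x => x) false).flatMap
          (fun x => (PySem.List.sorted (PySem.Set.ofList (points.map (·.2))) (fun y => y) false).filterMap
            (fun y => if points.contains (x, y) then none else some (x, y))) := by
  unfold pvHananA
  refine Eq.trans (PySem.List.foldl_congr_mem _ _
      (fun acc x => acc ++ (PySem.List.sorted (PySem.Set.ofList (points.map (·.2))) (fun y => y) false).filterMap
        (fun y => if points.contains (x, y) then none else some (x, y))) _ ?_) ?_
  · intro acc x _
    exact pv_hanan_inner points x _ acc
  · rw [PySem.List.foldl_append_eq_flatMap, List.nil_append]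

theorem pv_gainsAB (points : List (Int × Int)) (cur : Int) :
    pvGainsB points cur
      = PySem.List.sorted (pvGainsA points cur (pvHananA points)) (fun t => -t.1) false := by
  unfold pvGainsB pvGainsA
  simp only [pv_rmstAB]
  rw [pv_gains_fold, pv_hanan_flat, List.nil_append, List.filterMap_flatMap]
  show PySem.List.sorted (List.flatMap _ _) _ _ = PySem.List.sorted (List.flatMap _ _) _ _
  congr 1
  refine List.flatMap_congr (fun x _ => ?_)
  rw [List.filterMap_filterMap]
  refine List.filterMap_congr (fun y _ => ?_)
  by_cases h : (x, y) ∈ points <;> simp [h]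

theorem pv_addAB (gains : List (Int × (Int × Int))) : pvAddA gains = pvAddB gains := by
  unfold pvAddA pvAddB
  refine congrArg Prod.fst (PySem.List.foldl_congr_mem _ _ _ _ ?_)
  intro acc x _
  cases PySem.Set.contains acc.2.1 x.2.1 && PySem.Set.contains acc.2.2 x.2.2 <;> simp

theorem pv_add_mono (l : List (Int × (Int × Int)))
    (st : List (Int × Int) × PySem.Set Int × PySem.Set Int) (h : st.1 ≠ []) :
    (l.foldl (fun st gc =>
      if PySem.Set.contains st.2.1 gc.2.1 && PySem.Set.contains st.2.2 gc.2.2 then st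
      else (st.1 ++ [gc.2], PySem.Set.add st.2.1 gc.2.1, PySem.Set.add st.2.2 gc.2.2)) st).1 ≠ [] := by
  induction l generalizing st with
  | nil => exact h
  | cons gc t ih =>
    rw [List.foldl_cons]
    split
    · exact ih st h
    · exact ih _ (by simp)

theorem pv_add_ne_nil (g : Int × (Int × Int)) (rest : List (Int × (Int × Int))) :
    pvAddA (g :: rest) ≠ [] := by
  unfold pvAddA
  rw [List.foldl_cons]
  have hc : PySem.Set.contains (PySem.Set.empty (α := Int)) g.2.1 = false := rfl
  rw [hc]
  exact pv_add_mono rest _ (by simp)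

theorem pv_loopAB (fuel : Nat) (points : List (Int × Int)) (cur : Int) :
    pvLoopA fuel points cur = pvLoopB fuel points cur := by
  induction fuel generalizing points cur with
  | zero => rfl
  | succ fuel ih =>
    simp only [pvLoopA, pvLoopB, pv_gainsAB]
    by_cases hc : (pvHananA points).isEmpty
    · rw [if_pos hc]
      rw [List.isEmpty_iff] at hc
      rw [hc]
      rfl
    · rw [if_neg hc]
      by_cases hg : (pvGainsA points cur (pvHananA points)).isEmpty
      · rw [if_pos hg]
        rw [List.isEmpty_iff] at hg
        rw [hg]
        rfl
      · rw [if_neg hg]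
        rw [List.isEmpty_iff] at hg
        have hsgne : PySem.List.sorted (pvGainsA points cur (pvHananA points)) (fun t => -t.1) false ≠ [] := by
          simpa [PySem.List.sorted_eq_nil_iff] using hg
        obtain ⟨g0, rest, hsg⟩ := List.exists_cons_of_ne_nil hsgne
        rw [hsg]
        rw [if_neg (by simpa [pv_addAB] using pv_add_ne_nil g0 rest)]
        simp only [List.headD_cons, pv_addAB, pv_rmstAB]
        by_cases hle : cur ≤ pvRmstB (points ++ pvAddB (g0 :: rest))
        · rw [if_pos hle, if_pos hle]
          exact ih _ _
        · rw [if_neg hle, if_neg hle]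
          exact ih _ _

-- ===== VERDICT (by name: the statement is the Claim_ definition above) =====
theorem i1s_batched_spec : Claim_equal_i1s_batched := by
  intro terminals _
  unfold Spec_i1s_batched i1s_batched i1s_batched_alt
  rw [pv_rmstAB, pv_loopAB]
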